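-- pv_equiv track=rewrite | github.com/lVoidi/CE | recursion/tareacorta4.py | cuente_ceros_aux
-- ===== SOURCE A (Python) =====
-- def cuente_ceros_aux(num):
--     # Entrada: número para contar sus ceros
--     # Salida: La cantidad de ceros del número
--     # Restricciones: Número entero positivo
--     current_digit = num % 10
--     if num == 0: # caso base
--         return 0
--     if current_digit == 0:
--         return 1 + cuente_ceros_aux(num // 10)
--     else:
--         return cuente_ceros_aux(num // 10)
-- ===== SOURCE B (Python) =====
-- def _digits(num):
--     # least-significant-first digit list of num
--     ds = []
--     while num != 0:
--         ds.append(num % 10)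
--         num //= 10
--     return ds
--
-- def cuente_ceros_aux(num):
--     # Staged re-implementation: materialize the digit list, then count the zeros.
--     return _digits(num).count(0)
-- ===== Notes on version B (the rewrite author's own statement) =====
-- stated objective: alternative
-- what changed: Replaces the non-tail recursion that increments per zero digit by two staged passes: an iterative loop materializes the digit list, then list.count counts the zero entries.
import Mathlib
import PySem

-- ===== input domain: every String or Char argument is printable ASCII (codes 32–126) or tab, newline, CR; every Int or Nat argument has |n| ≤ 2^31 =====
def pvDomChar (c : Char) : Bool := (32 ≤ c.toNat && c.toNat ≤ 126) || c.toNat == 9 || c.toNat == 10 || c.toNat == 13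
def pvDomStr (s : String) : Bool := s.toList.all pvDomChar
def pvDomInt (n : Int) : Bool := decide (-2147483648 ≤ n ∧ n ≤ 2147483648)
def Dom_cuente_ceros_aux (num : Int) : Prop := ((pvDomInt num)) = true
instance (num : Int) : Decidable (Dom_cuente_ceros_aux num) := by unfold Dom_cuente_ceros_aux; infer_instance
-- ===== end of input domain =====

-- B stages the work: build the digit list, then count zeros (return value only; same cost).
-- ===== PORT A =====
-- A's recursion, totalised with fuel (one more unit of fuel than num.toNat suffices on the nonnegative domain).
def pvAuxA : Nat → Int → Int
  | 0, _ => 0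
  | f + 1, num =>
    let current_digit := PySem.Int.mod num 10
    if num = 0 then 0
    else if current_digit = 0 then 1 + pvAuxA f (PySem.Int.floordiv num 10)
    else pvAuxA f (PySem.Int.floordiv num 10)

def cuente_ceros_aux (num : Int) : Int := pvAuxA (num.toNat + 1) num

-- ===== PORT B =====
-- _digits's while loop as a fuel-bounded tail recursion appending to the list ds.
def pvDigLoop : Nat → Int → List Int → List Int
  | 0, _, ds => ds
  | f + 1, num, ds =>
    if num = 0 then ds
    else pvDigLoop f (PySem.Int.floordiv num 10) (ds ++ [PySem.Int.mod num 10])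

def pvDigits (num : Int) : List Int := pvDigLoop (num.toNat + 1) num []

def cuente_ceros_aux_alt (num : Int) : Int := PySem.List.count (pvDigits num) 0

-- ===== PRECONDITION & SPEC =====
-- Pre_ excludes negative inputs, on which Python A recurses forever (RecursionError) and B's digit loop does not terminate.
def Pre_cuente_ceros_aux (num : Int) : Prop := 0 ≤ num
instance (num : Int) : Decidable (Pre_cuente_ceros_aux num) := by unfold Pre_cuente_ceros_aux; infer_instance
def pvWitness_cuente_ceros_aux : Int := (10050)

def Spec_cuente_ceros_aux (num : Int) (out : Int) : Prop := out = cuente_ceros_aux_alt num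
instance (num : Int) (out : Int) : Decidable (Spec_cuente_ceros_aux num out) := by unfold Spec_cuente_ceros_aux; infer_instance

-- ===== CLAIM (what is proved, stated in full; the proofs are below) =====
def Claim_equal_cuente_ceros_aux : Prop := ∀ (num : Int), Dom_cuente_ceros_aux num → Pre_cuente_ceros_aux num → Spec_cuente_ceros_aux num (cuente_ceros_aux num)

-- ===== LEMMAS AND PROOFS =====
-- The zero-count of the digit list built on top of ds is ds's zero-count plus A's recursive value, fuel for fuel.
theorem count_pvDigLoop (f : Nat) : ∀ (num : Int) (ds : List Int),
    PySem.List.count (pvDigLoop f num ds) 0 = PySem.List.count ds 0 + pvAuxA f num := by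
  induction f with
  | zero => intro num ds; simp [pvDigLoop, pvAuxA]
  | succ f ih =>
    intro num ds
    simp only [pvDigLoop, pvAuxA]
    by_cases h : num = 0
    · simp [h]
    · simp only [h, if_false, ih]
      by_cases hz : PySem.Int.mod num 10 = 0
      · have hd : (10 : Int) ∣ num := (PySem.Int.mod_eq_zero_iff_dvd num 10).mp hz
        have hz' : num % 10 = 0 := Int.emod_eq_zero_of_dvd hd
        simp [PySem.List.count, hz', hd]
        ring
      · have hd : ¬ (10 : Int) ∣ num := fun d => hz ((PySem.Int.mod_eq_zero_iff_dvd num 10).mpr d)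
        have hz' : num % 10 ≠ 0 := fun e => hd (Int.dvd_of_emod_eq_zero e)
        simp [PySem.List.count, hz', hd]

-- ===== VERDICT (by name: the statement is the Claim_ definition above) =====
theorem cuente_ceros_aux_spec : Claim_equal_cuente_ceros_aux := by
  intro num _ _
  unfold Spec_cuente_ceros_aux cuente_ceros_aux cuente_ceros_aux_alt pvDigits
  rw [count_pvDigLoop]
  simp [PySem.List.count]
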